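-- pv_equiv track=rewrite | github.com/Moraaalice/practising-python | daySeventeen.py | list_of_integers
-- ===== SOURCE A (Python) =====
-- def list_of_integers(nums):
--     addition = 0
--     for n in nums:
--         if n > 0:
--             addition += n
--         if n < 0:
--             break
--     return addition
-- ===== SOURCE B (Python) =====
-- def first_negative_index(nums):
--     for i, n in enumerate(nums):
--         if n < 0:
--             return i
--     return len(nums)
--
-- def list_of_integers(nums):
--     cut = first_negative_index(nums)
--     return sum(max(n, 0) for n in nums[:cut])
-- ===== Notes on version B (the rewrite author's own statement) =====
-- stated objective: alternative
-- what changed: Replaced A's single loop that interleaves conditional accumulation with a break by two staged passes: first compute the index of the first negative element, then slice the list there and sum the clamped values max(n,0), so the positivity filter disappears into arithmetic clamping.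
import Mathlib
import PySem

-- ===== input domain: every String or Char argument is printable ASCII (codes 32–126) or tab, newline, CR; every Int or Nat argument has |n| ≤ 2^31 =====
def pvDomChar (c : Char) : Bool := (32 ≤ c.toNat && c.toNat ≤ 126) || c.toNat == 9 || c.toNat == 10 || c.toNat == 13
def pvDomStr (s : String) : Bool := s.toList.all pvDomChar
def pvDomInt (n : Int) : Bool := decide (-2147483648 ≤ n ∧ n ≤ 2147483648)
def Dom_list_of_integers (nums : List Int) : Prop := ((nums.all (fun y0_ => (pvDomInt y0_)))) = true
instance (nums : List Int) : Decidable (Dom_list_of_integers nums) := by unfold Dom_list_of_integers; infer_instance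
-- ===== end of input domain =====

-- B splits A's break-loop into staged passes: find the first-negative index, slice there, sum clamped values max(n,0) (alternative decomposition; same cost).


-- ===== PORT A =====
-- A: single loop, accumulating positives, breaking at the first negative.
def listOfIntegersLoop (addition : Int) : List Int → Int
  | [] => addition
  | n :: rest =>
      let addition' := if n > 0 then addition + n else addition
      if n < 0 then addition' else listOfIntegersLoop addition' rest

def list_of_integers (nums : List Int) : Int := listOfIntegersLoop 0 nums

-- ===== PORT B =====
-- helper first_negative_index: index of the first negative element, or the length if none.
def firstNegIdx : List Int → Nat
  | [] => 0
  | n :: rest => if n < 0 then 0 else firstNegIdx rest + 1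

-- B: slice the list at that index (nums[:cut], cut ≥ 0, = take), then sum max(n, 0).
def list_of_integers_alt (nums : List Int) : Int :=
  let cut := firstNegIdx nums
  ((nums.take cut).map (fun n => max n 0)).sum

-- ===== PRECONDITION & SPEC =====
def Spec_list_of_integers (nums : List Int) (out : Int) : Prop := out = list_of_integers_alt nums
instance (nums : List Int) (out : Int) : Decidable (Spec_list_of_integers nums out) := by unfold Spec_list_of_integers; infer_instance

-- ===== CLAIM (what is proved, stated in full; the proofs are below) =====
def Claim_equal_list_of_integers : Prop := ∀ (nums : List Int), Dom_list_of_integers nums → Spec_list_of_integers nums (list_of_integers nums)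

-- ===== LEMMAS AND PROOFS =====
theorem listOfIntegersLoop_eq (acc : Int) (nums : List Int) :
    listOfIntegersLoop acc nums = acc + list_of_integers_alt nums := by
  induction nums generalizing acc with
  | nil => simp [listOfIntegersLoop, list_of_integers_alt, firstNegIdx]
  | cons n rest ih =>
      simp only [listOfIntegersLoop, list_of_integers_alt, firstNegIdx]
      by_cases hneg : n < 0
      · have hpos : ¬ (n > 0) := by omega
        simp [hneg, hpos]
      · by_cases hpos : n > 0
        · have hmax : max n 0 = n := by omega
          simp only [hneg, hpos, if_true, if_false, ih, list_of_integers_alt,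
            List.take_succ_cons, List.map_cons, List.sum_cons, hmax]
          ring
        · have hmax : max n 0 = 0 := by omega
          simp only [hneg, hpos, if_true, if_false, ih, list_of_integers_alt,
            List.take_succ_cons, List.map_cons, List.sum_cons, hmax]
          ring

-- ===== VERDICT (by name: the statement is the Claim_ definition above) =====
theorem list_of_integers_spec : Claim_equal_list_of_integers := by
  intro nums _
  unfold Spec_list_of_integers list_of_integers
  simpa using listOfIntegersLoop_eq 0 nums
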